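-- pv_equiv track=rewrite | github.com/Clark1216/CE2M_Journey-TheWorldAvatar | QuestionAnswering/QA_SEQ2SEQ/data_generation/paraphrase/base.py | _extract_literals
-- ===== SOURCE A (Python) =====
-- from typing import List, Optional, Tuple
--
-- def _extract_literals(text: str):
--     # to be deprecated
--     """Extracts literals enclosed by square brackets."""
--     literals: List[str] = []
--     ptr = 0
--     while ptr < len(text):
--         start = text.find("[", ptr)
--         if start < 0:
--             break
--
--         # check that [ is not in the middle of a word
--         if start > 0 and not text[start - 1].isspace():
--             ptr = start + 1
--             continue
--
--         end = start + 1
--         while end < len(text):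
--             end = text.find("]", end)
--             if end < 0:
--                 break
--             if (
--                 end + 1 == len(text)
--                 or text[end + 1].isspace()
--                 or text[end + 1] in ".,!?;"
--             ):
--                 break
--             else:
--                 end += 1
--
--         if end < 0:
--             break
--
--         literals.append(text[start : end + 1])
--         ptr = end + 1
--     return tuple(literals)
-- ===== SOURCE B (Python) =====
-- def _extract_literals(text: str):
--     """Extracts literals enclosed by square brackets."""
--     n = len(text)
--     opens = [i for i in range(n)
--              if text[i] == "[" and (i == 0 or text[i - 1].isspace())]
--     closes = [i for i in range(n)
--               if text[i] == "]" and (i + 1 == n or text[i + 1].isspace()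
--                                      or text[i + 1] in ".,!?;")]
--     literals = []
--     pos = 0
--     for o in opens:
--         if o < pos:
--             continue
--         while closes and closes[0] < o:
--             closes.pop(0)
--         if not closes:
--             break
--         c = closes[0]
--         literals.append(text[o:c + 1])
--         pos = c + 1
--     return tuple(literals)
-- ===== Notes on version B (the rewrite author's own statement) =====
-- stated objective: alternative
-- what changed: Replaced the nested find()-and-retry scanning loops with a precomputation of the two sorted lists of valid opening- and closing-bracket positions (two comprehensions over range(n)) followed by a single two-pointer merge of those lists.
-- intended difference: When the last character of text is an opening bracket at start-of-text or after whitespace and every earlier valid opening bracket has a matching valid closing bracket, A emits a spurious one-character literal holding just that opening bracket (its inner loop never runs so end=len>=0 slips past the end<0 check); B omits it, the intended behaviour for literals enclosed by brackets. — e.g. on _extract_literals("[a] ["): A returns ["[a]", "["], B returns ["[a]"]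
import Mathlib
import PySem

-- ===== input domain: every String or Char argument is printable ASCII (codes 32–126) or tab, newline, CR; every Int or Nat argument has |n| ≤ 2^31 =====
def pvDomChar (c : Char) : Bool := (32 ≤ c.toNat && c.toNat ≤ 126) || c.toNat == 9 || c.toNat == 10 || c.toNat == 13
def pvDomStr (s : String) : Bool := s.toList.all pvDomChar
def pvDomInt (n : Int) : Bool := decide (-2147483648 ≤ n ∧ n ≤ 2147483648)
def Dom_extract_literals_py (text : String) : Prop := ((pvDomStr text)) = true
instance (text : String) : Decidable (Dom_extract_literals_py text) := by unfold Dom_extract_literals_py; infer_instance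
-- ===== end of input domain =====

-- B replaces A's nested find()/retry scanning loops by precomputed sorted lists of the valid
-- opening- and closing-bracket positions merged with two pointers; on the D_ inputs below B
-- intentionally omits A's spurious trailing one-character literal.

-- ===== PORT A =====
-- transliteration of A's inner `while end < len(text): end = text.find("]", end); …` loop
def pvAInner (l : List Char) : Nat → Int → Int
  | 0, e => e
  | f + 1, e =>
    if e < (l.length : Int) then
      let e' := PySem.Chars.findFrom l [']'] e none
      if e' < 0 then e'
      else if e' + 1 = (l.length : Int)
            ∨ PySem.Chars.isspace (PySem.List.pyGetD l (e' + 1) ' ') = true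
            ∨ ['.', ',', '!', '?', ';'].contains (PySem.List.pyGetD l (e' + 1) ' ') = true then e'
      else pvAInner l f (e' + 1)
    else e

-- transliteration of A's outer `while ptr < len(text)` loop (fuel: ptr strictly increases)
def pvAOuter (l : List Char) : Nat → Int → List (List Char) → List (List Char)
  | 0, _, acc => acc
  | f + 1, ptr, acc =>
    if ptr < (l.length : Int) then
      let s := PySem.Chars.findFrom l ['['] ptr none
      if s < 0 then acc
      else if 0 < s ∧ ¬ PySem.Chars.isspace (PySem.List.pyGetD l (s - 1) ' ') = true then
        pvAOuter l f (s + 1) acc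
      else
        let e := pvAInner l (l.length + 1) (s + 1)
        if e < 0 then acc
        else pvAOuter l f (e + 1) (acc ++ [PySem.List.slice l (some s) (some (e + 1))])
    else acc

def extract_literals_py (text : String) : List String :=
  (pvAOuter text.toList (text.toList.length + 1) 0 []).map (fun cs => String.ofList cs)

-- ===== PORT B =====
-- `text[i] == "[" and (i == 0 or text[i-1].isspace())`
def pvVOpenB (l : List Char) (i : Int) : Bool :=
  PySem.List.pyGetD l i ' ' == '['
    && (i == 0 || PySem.Chars.isspace (PySem.List.pyGetD l (i - 1) ' '))

-- `text[i] == "]" and (i+1 == n or text[i+1].isspace() or text[i+1] in ".,!?;")`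
def pvVCloseB (l : List Char) (i : Int) : Bool :=
  PySem.List.pyGetD l i ' ' == ']'
    && (i + 1 == (l.length : Int)
        || PySem.Chars.isspace (PySem.List.pyGetD l (i + 1) ' ')
        || ['.', ',', '!', '?', ';'].contains (PySem.List.pyGetD l (i + 1) ' '))

-- B's `for o in opens` loop; `while closes and closes[0] < o: closes.pop(0)` is the dropWhile
def pvBLoop (l : List Char) : List Int → List Int → Int → List (List Char)
  | [], _, _ => []
  | o :: os, closes, pos =>
    if o < pos then pvBLoop l os closes pos
    else
      match closes.dropWhile (fun c => decide (c < o)) with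
      | [] => []
      | c :: cs =>
        PySem.List.slice l (some o) (some (c + 1)) :: pvBLoop l os (c :: cs) (c + 1)

def extract_literals_py_alt (text : String) : List String :=
  let l := text.toList
  let opens := (PySem.List.pyRange 0 (l.length : Int) 1).filter (pvVOpenB l)
  let closes := (PySem.List.pyRange 0 (l.length : Int) 1).filter (pvVCloseB l)
  (pvBLoop l opens closes 0).map (fun cs => String.ofList cs)

-- ===== PRECONDITION & SPEC =====
-- When text ends in an opening bracket that is at start-of-text or preceded by whitespace and
-- every earlier such valid opening bracket has, somewhere after it, a closing bracket followed
-- by end-of-text, whitespace or sentence punctuation, A returns the literals followed by a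
-- spurious one-character literal holding just that opening bracket (its inner loop never runs,
-- so end = len ≥ 0 slips past the end < 0 check) while B returns just the enclosed literals,
-- the intended value.
def D_extract_literals_py (text : String) : Prop :=
  1 ≤ text.toList.length ∧
  text.toList[text.toList.length - 1]? = some '[' ∧
  (text.toList.length = 1 ∨
    PySem.Chars.isspace (text.toList.getD (text.toList.length - 2) ' ') = true) ∧
  ∀ o, o < text.toList.length - 1 → text.toList[o]? = some '[' →
      (o = 0 ∨ PySem.Chars.isspace (text.toList.getD (o - 1) ' ') = true) →
    ∃ c, c < text.toList.length ∧ o < c ∧ text.toList[c]? = some ']' ∧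
      (c + 1 = text.toList.length ∨
        PySem.Chars.isspace (text.toList.getD (c + 1) ' ') = true ∨
        text.toList.getD (c + 1) ' ' ∈ ['.', ',', '!', '?', ';'])

instance (text : String) : Decidable (D_extract_literals_py text) := by
  unfold D_extract_literals_py
  have h : ∀ o : Nat, Decidable (∃ c, c < text.toList.length ∧ o < c ∧
      text.toList[c]? = some ']' ∧
      (c + 1 = text.toList.length ∨
        PySem.Chars.isspace (text.toList.getD (c + 1) ' ') = true ∨
        text.toList.getD (c + 1) ' ' ∈ ['.', ',', '!', '?', ';'])) := fun o => by infer_instance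
  infer_instance

def Spec_extract_literals_py (text : String) (out : List String) : Prop :=
  ¬ D_extract_literals_py text → out = extract_literals_py_alt text
instance (text : String) (out : List String) : Decidable (Spec_extract_literals_py text out) := by
  unfold Spec_extract_literals_py; infer_instance

def pvDiffWitness_extract_literals_py : String := "[a] ["
def pvDiffWitnessOut_extract_literals_py : (List String) × (List String) := (["[a]", "["], ["[a]"])

-- ===== CLAIM (what is proved, stated in full; the proofs are below) =====
def Claim_unchanged_extract_literals_py : Prop := ∀ (text : String), Dom_extract_literals_py text → Spec_extract_literals_py text (extract_literals_py text)
def Claim_changed_extract_literals_py : Prop := Dom_extract_literals_py (pvDiffWitness_extract_literals_py) ∧ D_extract_literals_py (pvDiffWitness_extract_literals_py) ∧ extract_literals_py (pvDiffWitness_extract_literals_py) = pvDiffWitnessOut_extract_literals_py.1 ∧ extract_literals_py_alt (pvDiffWitness_extract_literals_py) = pvDiffWitnessOut_extract_literals_py.2 ∧ pvDiffWitnessOut_extract_literals_py.1 ≠ pvDiffWitnessOut_extract_literals_py.2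
def Claim_exact_extract_literals_py : Prop := ∀ (text : String), Dom_extract_literals_py text → D_extract_literals_py text → extract_literals_py text ≠ extract_literals_py_alt text

-- ===== LEMMAS AND PROOFS =====

-- valid-open / valid-close position predicates over Nat indexes (proof-side)
def pvVO (l : List Char) (i : Nat) : Bool :=
  (l.getD i ' ' == '[') && (i == 0 || PySem.Chars.isspace (l.getD (i - 1) ' '))

def pvVC (l : List Char) (i : Nat) : Bool :=
  (l.getD i ' ' == ']')
    && ((i + 1 == l.length)
        || PySem.Chars.isspace (l.getD (i + 1) ' ')
        || ['.', ',', '!', '?', ';'].contains (l.getD (i + 1) ' '))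

theorem pvVO_iff (l : List Char) (i : Nat) (hi : i < l.length) :
    pvVO l i = true ↔ (l[i]? = some '[' ∧ (i = 0 ∨ PySem.Chars.isspace (l.getD (i - 1) ' ') = true)) := by
  simp [pvVO, List.getD_eq_getElem?_getD, List.getElem?_eq_getElem hi]

theorem pvVC_iff (l : List Char) (c : Nat) (hc : c < l.length) :
    pvVC l c = true ↔ (l[c]? = some ']' ∧
      (c + 1 = l.length ∨ PySem.Chars.isspace (l.getD (c + 1) ' ') = true ∨
        l.getD (c + 1) ' ' ∈ ['.', ',', '!', '?', ';'])) := by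
  simp [pvVC, List.getD_eq_getElem?_getD, List.getElem?_eq_getElem hc, or_assoc]

theorem pvD_iff (text : String) : D_extract_literals_py text ↔
    (1 ≤ text.toList.length ∧ pvVO text.toList (text.toList.length - 1) = true ∧
      ∀ o, o < text.toList.length - 1 → pvVO text.toList o = true →
        ∃ c, c < text.toList.length ∧ o < c ∧ pvVC text.toList c = true) := by
  unfold D_extract_literals_py
  constructor
  · rintro ⟨h1, h2, h3, h4⟩
    refine ⟨h1, ?_, fun o ho hvo => ?_⟩
    · rw [pvVO_iff _ _ (by omega)]
      refine ⟨h2, ?_⟩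
      rcases h3 with h | h
      · left; omega
      · right
        rw [show text.toList.length - 1 - 1 = text.toList.length - 2 by omega]
        exact h
    · rw [pvVO_iff _ _ (by omega)] at hvo
      obtain ⟨c, hc1, hc2, hc3, hc4⟩ := h4 o ho hvo.1 hvo.2
      exact ⟨c, hc1, hc2, (pvVC_iff _ _ hc1).mpr ⟨hc3, hc4⟩⟩
  · rintro ⟨h1, h2, h3⟩
    rw [pvVO_iff _ _ (by omega)] at h2
    refine ⟨h1, h2.1, ?_, fun o ho hop hsp => ?_⟩
    · rcases h2.2 with h | h
      · left; omega
      · right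
        rw [show text.toList.length - 1 - 1 = text.toList.length - 2 by omega] at h
        exact h
    · obtain ⟨c, hc1, hc2, hc3⟩ := h3 o ho ((pvVO_iff _ _ (by omega)).mpr ⟨hop, hsp⟩)
      rw [pvVC_iff _ _ hc1] at hc3
      exact ⟨c, hc1, hc2, hc3.1, hc3.2⟩

def pvFirst (P : Nat → Bool) (n p : Nat) : Option Nat :=
  if _h : p < n then (if P p then some p else pvFirst P n (p + 1)) else none
  termination_by n - p

theorem pvFirst_some {P : Nat → Bool} {n p i : Nat} (h : pvFirst P n p = some i) :
    p ≤ i ∧ i < n ∧ P i = true ∧ ∀ j, p ≤ j → j < i → P j = false := by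
  fun_induction pvFirst P n p with
  | case1 p hp hP => simp at h; subst h; exact ⟨le_refl _, hp, hP, by omega⟩
  | case2 p hp hP ih =>
    obtain ⟨h1, h2, h3, h4⟩ := ih h
    refine ⟨by omega, h2, h3, fun j hj1 hj2 => ?_⟩
    rcases Nat.eq_or_lt_of_le hj1 with rfl | hlt
    · simpa using hP
    · exact h4 j hlt hj2
  | case3 p hp => simp at h

theorem pvFirst_none {P : Nat → Bool} {n p : Nat} (h : pvFirst P n p = none) :
    ∀ j, p ≤ j → j < n → P j = false := by
  fun_induction pvFirst P n p with
  | case1 p hp hP => simp at h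
  | case2 p hp hP ih =>
    intro j hj1 hj2
    rcases Nat.eq_or_lt_of_le hj1 with rfl | hlt
    · simpa using hP
    · exact ih h j hlt hj2
  | case3 p hp => intro j hj1 hj2; omega

theorem pvFirst_none_intro {P : Nat → Bool} {n p : Nat}
    (h : ∀ j, p ≤ j → j < n → P j = false) : pvFirst P n p = none := by
  fun_induction pvFirst P n p with
  | case1 p hp hP => rw [h p le_rfl hp] at hP; simp at hP
  | case2 p hp hP ih => exact ih (fun j hj1 hj2 => h j (by omega) hj2)
  | case3 p hp => rfl

theorem pvFirst_intro {P : Nat → Bool} {n p i : Nat} (hp : p ≤ i) (hi : i < n)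
    (hP : P i = true) (hmin : ∀ j, p ≤ j → j < i → P j = false) :
    pvFirst P n p = some i := by
  fun_induction pvFirst P n p with
  | case1 p hp' hP' =>
    rcases Nat.eq_or_lt_of_le hp with rfl | hlt
    · rfl
    · rw [hmin p le_rfl hlt] at hP'; simp at hP'
  | case2 p hp' hP' ih =>
    have : p ≠ i := by rintro rfl; simp [hP] at hP'
    exact ih (by omega) (fun j hj1 hj2 => hmin j (by omega) hj2)
  | case3 p hp' => omega

theorem pvFirst_step {P : Nat → Bool} {n p m : Nat} (hpm : p ≤ m)
    (h : ∀ j, p ≤ j → j < m → P j = false) : pvFirst P n p = pvFirst P n m := by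
  cases hm : pvFirst P n m with
  | none =>
    exact pvFirst_none_intro (fun j hj1 hj2 => by
      by_cases hjm : j < m
      · exact h j hj1 hjm
      · exact pvFirst_none hm j (by omega) hj2)
  | some i =>
    obtain ⟨h1, h2, h3, h4⟩ := pvFirst_some hm
    exact pvFirst_intro (by omega) h2 h3 (fun j hj1 hj2 => by
      by_cases hjm : j < m
      · exact h j hj1 hjm
      · exact h4 j (by omega) hj2)

theorem pvFirst_ge {P : Nat → Bool} {n p : Nat} (h : n ≤ p) : pvFirst P n p = none := by
  unfold pvFirst; rw [dif_neg (by omega)]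

def pvFilt (P : Nat → Bool) (n t : Nat) : List Nat :=
  if _h : t < n then (if P t then t :: pvFilt P n (t + 1) else pvFilt P n (t + 1)) else []
  termination_by n - t

theorem pvFilt_eq (P : Nat → Bool) (n t : Nat) :
    pvFilt P n t = match pvFirst P n t with
      | none => []
      | some i => i :: pvFilt P n (i + 1) := by
  fun_induction pvFilt P n t with
  | case1 t ht hP => rw [pvFirst, dif_pos ht, if_pos hP]
  | case2 t ht hP ih => rw [pvFirst, dif_pos ht, if_neg hP]; exact ih
  | case3 t ht => rw [pvFirst, dif_neg ht]

theorem pvSingletonPrefix {c : Char} {xs : List Char} :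
    [c] <+: xs ↔ xs.head? = some c := by
  cases xs with
  | nil => simp
  | cons a t => simp [List.cons_prefix_cons, eq_comm]

theorem pvFindChar (l : List Char) (ch : Char) (k : Nat) (hk : k ≤ l.length) :
    PySem.Chars.findFrom l [ch] (k : Int) none =
      match pvFirst (fun i => l.getD i ' ' == ch) l.length k with
      | none => -1
      | some j => (j : Int) := by
  by_cases hff : PySem.Chars.findFrom l [ch] (k : Int) none = -1
  · rw [hff]
    have hno := (PySem.Chars.findFrom_natCast_eq_neg_one_iff l [ch] k hk).mp hff
    have : pvFirst (fun i => l.getD i ' ' == ch) l.length k = none := by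
      apply pvFirst_none_intro
      intro j hj1 hj2
      by_contra hP
      simp only [Bool.not_eq_false, beq_iff_eq] at hP
      apply hno
      have hpre : [ch] <+: l.drop j := by
        rw [pvSingletonPrefix, List.head?_drop]
        rw [List.getElem?_eq_getElem hj2]
        rw [List.getD_eq_getElem?_getD, List.getElem?_eq_getElem hj2] at hP
        simp_all
      have hsuf : l.drop j <:+ l.drop k := by
        have : l.drop j = (l.drop k).drop (j - k) := by
          rw [List.drop_drop]; congr 1; omega
        rw [this]; exact List.drop_suffix _ _
      exact hpre.isInfix.trans hsuf.isInfix
    rw [this]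
  · obtain ⟨h1, h2, h3⟩ := PySem.Chars.findFrom_natCast_spec l [ch] k hk hff
    set r := PySem.Chars.findFrom l [ch] (k : Int) none with hr
    have hr0 : 0 ≤ r := le_trans (by positivity) h1
    have hget : (l.drop r.toNat).head? = some ch := pvSingletonPrefix.mp h2
    rw [List.head?_drop] at hget
    have hrn : r.toNat < l.length := by
      by_contra hc
      rw [List.getElem?_eq_none (by omega)] at hget
      simp at hget
    have : pvFirst (fun i => l.getD i ' ' == ch) l.length k = some r.toNat := by
      apply pvFirst_intro (by omega) hrn
      · simp only [beq_iff_eq]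
        rw [List.getD_eq_getElem?_getD, List.getElem?_eq_getElem hrn] at *
        simp_all
      · intro j hj1 hj2
        by_contra hP
        simp only [Bool.not_eq_false, beq_iff_eq] at hP
        apply h3 j hj1 hj2
        rw [pvSingletonPrefix, List.head?_drop]
        have hjn : j < l.length := by omega
        rw [List.getElem?_eq_getElem hjn]
        rw [List.getD_eq_getElem?_getD, List.getElem?_eq_getElem hjn] at hP
        simp_all
    rw [this]
    simp [hr0]

theorem pvAInner_eq (l : List Char) : ∀ (f e : Nat), l.length ≤ f + e →
    pvAInner l f (e : Int) =
      if l.length ≤ e then (e : Int)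
      else match pvFirst (pvVC l) l.length e with
        | none => -1
        | some c => (c : Int) := by
  intro f
  induction f with
  | zero =>
    intro e hf
    rw [if_pos (by omega)]
    rfl
  | succ f ih =>
    intro e hf
    by_cases he : l.length ≤ e
    · rw [if_pos he]
      show (if (e : Int) < (l.length : Int) then _ else _) = _
      rw [if_neg (by exact_mod_cast not_lt.mpr he)]
    · rw [if_neg he]
      show (if (e : Int) < (l.length : Int) then _ else _) = _
      rw [if_pos (by exact_mod_cast lt_of_not_ge he)]
      simp only
      cases hQ : pvFirst (fun i => l.getD i ' ' == ']') l.length e with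
      | none =>
        rw [pvFindChar l ']' e (by omega)]
        simp only [hQ]
        have : pvFirst (pvVC l) l.length e = none := by
          apply pvFirst_none_intro
          intro j hj1 hj2
          have := pvFirst_none hQ j hj1 hj2
          simp only [pvVC, this, Bool.false_and]
        rw [if_pos (by norm_num), this]
      | some j =>
        rw [pvFindChar l ']' e (by omega)]
        simp only [hQ]
        obtain ⟨hj1, hj2, hj3, hj4⟩ := pvFirst_some hQ
        rw [if_neg (by omega)]
        have hcast : ((j : Int) + 1) = ((j + 1 : Nat) : Int) := by push_cast; ring
        rw [hcast, PySem.List.pyGetD_natCast]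
        by_cases hC : (j + 1 : Nat) = l.length
              ∨ PySem.Chars.isspace (l.getD (j + 1) ' ') = true
              ∨ ['.', ',', '!', '?', ';'].contains (l.getD (j + 1) ' ') = true
        · have hCi : ((j : Nat) : Int) + 1 = (l.length : Int)
              ∨ PySem.Chars.isspace (l.getD (j + 1) ' ') = true
              ∨ ['.', ',', '!', '?', ';'].contains (l.getD (j + 1) ' ') = true := by
            rcases hC with h | h
            · left; exact_mod_cast h
            · right; exact h
          rw [hcast] at hCi
          rw [if_pos hCi]
          have hvc : pvVC l j = true := by
            simp only [pvVC, Bool.and_eq_true, Bool.or_eq_true, beq_iff_eq]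
            refine ⟨by simpa using hj3, ?_⟩
            rcases hC with h | h | h
            · exact Or.inl (Or.inl (by simpa using h))
            · exact Or.inl (Or.inr h)
            · exact Or.inr h
          have : pvFirst (pvVC l) l.length e = some j :=
            pvFirst_intro hj1 hj2 hvc (fun i hi1 hi2 => by
              have := hj4 i hi1 hi2
              simp only [pvVC, this, Bool.false_and])
          rw [this]
        · have hCi : ¬ (((j : Nat) : Int) + 1 = (l.length : Int)
              ∨ PySem.Chars.isspace (l.getD (j + 1) ' ') = true
              ∨ ['.', ',', '!', '?', ';'].contains (l.getD (j + 1) ' ') = true) := by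
            intro h
            apply hC
            rcases h with h | h
            · left; exact_mod_cast h
            · right; exact h
          rw [hcast] at hCi
          rw [if_neg hCi]
          have hvcf : pvVC l j = false := by
            push Not at hC
            obtain ⟨h1', h2', h3'⟩ := hC
            simp only [pvVC, Bool.and_eq_false_iff, Bool.or_eq_false_iff]
            exact Or.inr ⟨⟨by simpa using h1', by simpa using h2'⟩, by simpa using h3'⟩
          have hjn : j + 1 < l.length := by
            rcases Nat.lt_or_ge (j+1) l.length with h | h
            · exact h
            · exfalso; apply hC; left; omega
          rw [ih (j + 1) (by omega), if_neg (by omega)]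
          have : pvFirst (pvVC l) l.length e = pvFirst (pvVC l) l.length (j + 1) := by
            apply pvFirst_step (by omega)
            intro i hi1 hi2
            rcases Nat.lt_or_ge i j with h | h
            · have := hj4 i hi1 h
              simp only [pvVC, this, Bool.false_and]
            · have : i = j := by omega
              subst this; exact hvcf
          rw [this]

def pvSpecA (l : List Char) (p : Nat) : List (List Char) :=
  match h : pvFirst (pvVO l) l.length p with
  | none => []
  | some o =>
    if l.length ≤ o + 1 then [l.drop o]
    else
      match h2 : pvFirst (pvVC l) l.length (o + 1) with
      | none => []
      | some c => (l.drop o).take (c + 1 - o) :: pvSpecA l (c + 1)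
  termination_by l.length - p
  decreasing_by
    have a1 := pvFirst_some h
    have a2 := pvFirst_some h2
    omega

theorem pvSpecA_eq (l : List Char) (p : Nat) :
    pvSpecA l p = match pvFirst (pvVO l) l.length p with
      | none => []
      | some o =>
        if l.length ≤ o + 1 then [l.drop o]
        else
          match pvFirst (pvVC l) l.length (o + 1) with
          | none => []
          | some c => (l.drop o).take (c + 1 - o) :: pvSpecA l (c + 1) := by
  rw [pvSpecA]
  split
  · rename_i h'; simp only [h']
  · rename_i o h'
    simp only [h']
    split
    · rfl
    · split
      · rename_i h2'; simp only [h2']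
      · rename_i c h2'; simp only [h2']

theorem pvAOuter_eq (l : List Char) : ∀ (f p : Nat) (acc : List (List Char)),
    l.length + 1 ≤ f + p → pvAOuter l f (p : Int) acc = acc ++ pvSpecA l p := by
  intro f
  induction f with
  | zero =>
    intro p acc hf
    rw [pvSpecA_eq l p, pvFirst_ge (by omega)]
    simp [pvAOuter]
  | succ f ih =>
    intro p acc hf
    by_cases hp : p < l.length
    · show (if (p : Int) < (l.length : Int) then _ else _) = _
      rw [if_pos (by exact_mod_cast hp)]
      simp only
      cases hQ : pvFirst (fun i => l.getD i ' ' == '[') l.length p with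
      | none =>
        rw [pvFindChar l '[' p (by omega)]
        simp only [hQ]
        rw [if_pos (by norm_num)]
        rw [pvSpecA_eq l p, pvFirst_none_intro (fun j hj1 hj2 => by
          have := pvFirst_none hQ j hj1 hj2
          simp only [pvVO, this, Bool.false_and])]
        simp
      | some s =>
        rw [pvFindChar l '[' p (by omega)]
        simp only [hQ]
        obtain ⟨hs1, hs2, hs3, hs4⟩ := pvFirst_some hQ
        rw [if_neg (by omega)]
        by_cases hW : 0 < (s : Int) ∧ ¬ PySem.Chars.isspace (PySem.List.pyGetD l ((s : Int) - 1) ' ') = true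
        · -- '[' in the middle of a word: skip
          rw [if_pos hW]
          have hvof : pvVO l s = false := by
            obtain ⟨hW1, hW2⟩ := hW
            have hs0 : s ≠ 0 := by omega
            have hc : ((s : Int) - 1) = ((s - 1 : Nat) : Int) := by omega
            rw [hc, PySem.List.pyGetD_natCast] at hW2
            simp only [pvVO, Bool.and_eq_false_iff, Bool.or_eq_false_iff]
            exact Or.inr ⟨by simpa using hs0, by simpa using hW2⟩
          have hcast : (s : Int) + 1 = ((s + 1 : Nat) : Int) := by omega
          rw [hcast, ih (s + 1) acc (by omega)]
          congr 1
          rw [pvSpecA_eq l (s + 1), pvSpecA_eq l p]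
          rw [← pvFirst_step (n := l.length) (m := s + 1) (show p ≤ s + 1 by omega) (fun j hj1 hj2 => by
            rcases Nat.lt_or_ge j s with h | h
            · have := hs4 j hj1 h
              simp only [pvVO, this, Bool.false_and]
            · have : j = s := by omega
              subst this; exact hvof)]
        · -- valid '[' at s
          rw [if_neg hW]
          have hvo : pvVO l s = true := by
            simp only [pvVO, Bool.and_eq_true, Bool.or_eq_true]
            refine ⟨by simpa using hs3, ?_⟩
            by_cases hs0 : s = 0
            · left; simp [hs0]
            · right
              by_contra hsp
              apply hW
              refine ⟨by omega, ?_⟩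
              have hc : ((s : Int) - 1) = ((s - 1 : Nat) : Int) := by omega
              rw [hc, PySem.List.pyGetD_natCast]
              simpa using hsp
          have hFO : pvFirst (pvVO l) l.length p = some s :=
            pvFirst_intro hs1 hs2 hvo (fun j hj1 hj2 => by
              have := hs4 j hj1 hj2
              simp only [pvVO, this, Bool.false_and])
          have hcast : (s : Int) + 1 = ((s + 1 : Nat) : Int) := by omega
          rw [hcast, pvAInner_eq l (l.length + 1) (s + 1) (by omega)]
          by_cases hend : l.length ≤ s + 1
          · -- '[' is the last character: A's quirk branch
            rw [if_pos hend]
            rw [if_neg (by omega)]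
            have hc2 : ((s + 1 : Nat) : Int) + 1 = ((s + 2 : Nat) : Int) := by omega
            rw [hc2, ih (s + 2) _ (by omega)]
            rw [pvSpecA_eq l (s + 2), pvFirst_ge (by omega)]
            rw [pvSpecA_eq l p, hFO]
            simp only [if_pos hend]
            rw [PySem.List.slice_natCast]
            have hdrop : (l.drop s).take (s + 2 - s) = l.drop s := by
              apply List.take_of_length_le
              simp
              omega
            rw [hdrop]
            simp
          · rw [if_neg hend]
            cases hC2 : pvFirst (pvVC l) l.length (s + 1) with
            | none =>
              simp only [hC2]
              rw [if_pos (by norm_num)]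
              rw [pvSpecA_eq l p, hFO]
              simp only [if_neg hend, hC2]
              simp
            | some c =>
              simp only [hC2]
              obtain ⟨hc1, hc2, hc3, hc4⟩ := pvFirst_some hC2
              rw [if_neg (by omega)]
              have hc5 : ((c : Nat) : Int) + 1 = ((c + 1 : Nat) : Int) := by omega
              rw [hc5, ih (c + 1) _ (by omega)]
              rw [PySem.List.slice_natCast]
              rw [pvSpecA_eq l p, hFO]
              simp only [if_neg hend, hC2]
              simp
    · show (if (p : Int) < (l.length : Int) then _ else _) = _
      rw [if_neg (by exact_mod_cast hp)]
      rw [pvSpecA_eq l p, pvFirst_ge (by omega)]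
      simp

def pvSpecB (l : List Char) (p : Nat) : List (List Char) :=
  match h : pvFirst (pvVO l) l.length p with
  | none => []
  | some o =>
    match h2 : pvFirst (pvVC l) l.length (o + 1) with
    | none => []
    | some c => (l.drop o).take (c + 1 - o) :: pvSpecB l (c + 1)
  termination_by l.length - p
  decreasing_by
    have a1 := pvFirst_some h
    have a2 := pvFirst_some h2
    omega

theorem pvSpecB_eq (l : List Char) (p : Nat) :
    pvSpecB l p = match pvFirst (pvVO l) l.length p with
      | none => []
      | some o =>
        match pvFirst (pvVC l) l.length (o + 1) with
        | none => []
        | some c => (l.drop o).take (c + 1 - o) :: pvSpecB l (c + 1) := by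
  rw [pvSpecB]
  split
  · rename_i h'; simp only [h']
  · rename_i o h'
    simp only [h']
    split
    · rename_i h2'; simp only [h2']
    · rename_i c h2'; simp only [h2']

theorem pvVOpenB_eq (l : List Char) (i : Nat) : pvVOpenB l (i : Int) = pvVO l i := by
  cases i with
  | zero => simp [pvVOpenB, pvVO, PySem.List.pyGetD_zero, List.getD_eq_getElem?_getD]
  | succ j =>
    have h1 : ((j + 1 : Nat) : Int) - 1 = ((j : Nat) : Int) := by omega
    simp only [pvVOpenB, pvVO, h1, PySem.List.pyGetD_natCast]
    have e1 : (((j + 1 : Nat) : Int) == 0) = false := beq_eq_false_iff_ne.mpr (by omega)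
    have e2 : ((j + 1 : Nat) == 0) = false := beq_eq_false_iff_ne.mpr (by omega)
    rw [e1, e2, Nat.add_sub_cancel]

theorem pvVCloseB_eq (l : List Char) (i : Nat) : pvVCloseB l (i : Int) = pvVC l i := by
  have h1 : ((i : Nat) : Int) + 1 = ((i + 1 : Nat) : Int) := by omega
  simp only [pvVCloseB, pvVC, h1, PySem.List.pyGetD_natCast]
  have e1 : (((i + 1 : Nat) : Int) == ((l.length : Nat) : Int)) = ((i + 1 : Nat) == l.length) := by
    by_cases h : i + 1 = l.length
    · simp [h]
    · simp [h]; omega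
  rw [e1]

theorem pvFilt_ge {P : Nat → Bool} {n t : Nat} (h : n ≤ t) : pvFilt P n t = [] := by
  rw [pvFilt, dif_neg (by omega)]

theorem pvFilt_mem {P : Nat → Bool} {n t x : Nat} (h : x ∈ pvFilt P n t) : t ≤ x := by
  fun_induction pvFilt P n t with
  | case1 t ht hP ih =>
    rcases List.mem_cons.mp h with rfl | h'
    · exact le_refl _
    · have := ih h'; omega
  | case2 t ht hP ih => have := ih h; omega
  | case3 t ht => simp at h

theorem pvFilt_step {P : Nat → Bool} {n t : Nat} (h : P t = false) :
    pvFilt P n t = pvFilt P n (t + 1) := by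
  by_cases ht : t < n
  · rw [pvFilt, dif_pos ht, if_neg (by simp [h])]
  · rw [pvFilt_ge (by omega), pvFilt_ge (by omega)]

theorem pvRange_filter (P : Nat → Bool) (n : Nat) :
    (List.range n).filter P = pvFilt P n 0 := by
  suffices h : ∀ t, (List.range' t (n - t)).filter P = pvFilt P n t by
    have := h 0
    simpa [List.range_eq_range'] using this
  intro t
  fun_induction pvFilt P n t with
  | case1 t ht hP ih =>
    rw [show n - t = (n - (t+1)) + 1 by omega, List.range'_succ]
    simp only [List.filter_cons, hP, if_pos]
    rw [ih]
  | case2 t ht hP ih =>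
    rw [show n - t = (n - (t+1)) + 1 by omega, List.range'_succ]
    simp only [List.filter_cons, hP, Bool.false_eq_true, if_false]
    exact ih
  | case3 t ht => rw [show n - t = 0 by omega]; rfl

theorem pvFilt_dropWhile (P : Nat → Bool) (n : Nat) : ∀ (k u o : Nat), u ≤ o → n - u ≤ k →
    ((pvFilt P n u).map (fun (i : Nat) => (i : Int))).dropWhile (fun c => decide (c < (o : Int)))
      = (pvFilt P n o).map (fun (i : Nat) => (i : Int)) := by
  intro k
  induction k with
  | zero =>
    intro u o hu hk
    rw [pvFilt_ge (by omega), pvFilt_ge (by omega)]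
    rfl
  | succ k ih =>
    intro u o hu hk
    rcases Nat.lt_or_ge u o with huo | huo
    · by_cases hun : u < n
      · rw [pvFilt, dif_pos hun]
        by_cases hP : P u = true
        · rw [if_pos hP]
          rw [List.map_cons, List.dropWhile_cons]
          rw [if_pos (by simp only [decide_eq_true_eq]; omega)]
          exact ih (u + 1) o (by omega) (by omega)
        · rw [if_neg hP]
          exact ih (u + 1) o (by omega) (by omega)
      · rw [pvFilt_ge (by omega), pvFilt_ge (by omega)]
        rfl
    · have : u = o := by omega
      subst this
      cases hfe : pvFilt P n u with
      | nil => simp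
      | cons a t' =>
        have ha : u ≤ a := pvFilt_mem (by rw [hfe]; exact List.mem_cons_self)
        rw [List.map_cons, List.dropWhile_cons]
        rw [if_neg (by simp only [decide_eq_true_eq]; omega)]

theorem pvBLoop_eq (l : List Char) : ∀ (k t u pos : Nat), t ≤ pos → u ≤ pos → l.length - t ≤ k →
    pvBLoop l ((pvFilt (pvVO l) l.length t).map (fun (i : Nat) => (i : Int)))
      ((pvFilt (pvVC l) l.length u).map (fun (i : Nat) => (i : Int))) (pos : Int) = pvSpecB l pos := by
  intro k
  induction k with
  | zero =>
    intro t u pos ht hu hk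
    rw [pvFilt_ge (by omega)]
    rw [pvSpecB_eq, pvFirst_none_intro (fun j hj1 hj2 => by
      have := pvFirst_none (pvFirst_ge (P := pvVO l) (n := l.length) (p := t) (by omega))
      exact this j (by omega) hj2)]
    rfl
  | succ k ih =>
    intro t u pos ht hu hk
    rw [pvFilt_eq]
    cases hfo : pvFirst (pvVO l) l.length t with
    | none =>
      rw [pvSpecB_eq, pvFirst_none_intro (fun j hj1 hj2 =>
        pvFirst_none hfo j (by omega) hj2)]
      rfl
    | some o =>
      obtain ⟨ho1, ho2, ho3, ho4⟩ := pvFirst_some hfo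
      simp only [List.map_cons, pvBLoop]
      rcases Nat.lt_or_ge o pos with hop | hop
      · rw [if_pos (by exact_mod_cast hop)]
        exact ih (o + 1) u pos (by omega) hu (by omega)
      · rw [if_neg (by exact_mod_cast not_lt.mpr hop)]
        rw [pvFilt_dropWhile (pvVC l) l.length l.length u o (by omega) (by omega)]
        have hbr : (l.getD o ' ' == '[') = true := by
          have := ho3
          simp only [pvVO, Bool.and_eq_true] at this
          exact this.1
        have hvCo : pvVC l o = false := by
          have : (l.getD o ' ' == ']') = false := by
            simp only [beq_iff_eq] at hbr
            simp only [beq_eq_false_iff_ne]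
            simp only [hbr]
            decide
          simp only [pvVC, this, Bool.false_and]
        rw [pvFilt_step hvCo]
        have hFOpos : pvFirst (pvVO l) l.length pos = some o :=
          pvFirst_intro hop ho2 ho3 (fun j hj1 hj2 => ho4 j (by omega) hj2)
        rw [pvFilt_eq]
        cases hfc : pvFirst (pvVC l) l.length (o + 1) with
        | none =>
          rw [pvSpecB_eq, hFOpos]
          simp only [hfc]
          rfl
        | some c =>
          obtain ⟨hc1, hc2, hc3, hc4⟩ := pvFirst_some hfc
          simp only [List.map_cons]
          rw [pvSpecB_eq, hFOpos]
          simp only [hfc]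
          have hcast : ((c : Nat) : Int) + 1 = ((c + 1 : Nat) : Int) := by omega
          rw [hcast, PySem.List.slice_natCast]
          congr 1
          have hfold : ((c : Nat) : Int) :: List.map (fun (i : Nat) => (i : Int)) (pvFilt (pvVC l) l.length (c + 1))
              = List.map (fun (i : Nat) => (i : Int)) (pvFilt (pvVC l) l.length (o + 1)) := by
            rw [pvFilt_eq (pvVC l) l.length (o + 1)]
            simp only [hfc, List.map_cons]
          rw [hfold]
          exact ih (o + 1) (o + 1) (c + 1) (by omega) (by omega) (by omega)

theorem pvA_spec (text : String) :
    extract_literals_py text = (pvSpecA text.toList 0).map (fun cs => String.ofList cs) := by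
  unfold extract_literals_py
  rw [show (0 : Int) = ((0 : Nat) : Int) from rfl,
    pvAOuter_eq text.toList (text.toList.length + 1) 0 [] (by omega)]
  simp

theorem pvB_spec (text : String) :
    extract_literals_py_alt text = (pvSpecB text.toList 0).map (fun cs => String.ofList cs) := by
  unfold extract_literals_py_alt
  simp only
  rw [PySem.List.pyRange_zero_natCast]
  rw [List.filter_map, List.filter_map]
  rw [show (pvVOpenB text.toList ∘ fun (i : Nat) => (i : Int)) = pvVO text.toList from
    funext (pvVOpenB_eq text.toList)]
  rw [show (pvVCloseB text.toList ∘ fun (i : Nat) => (i : Int)) = pvVC text.toList from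
    funext (pvVCloseB_eq text.toList)]
  rw [pvRange_filter, pvRange_filter]
  rw [show (0 : Int) = ((0 : Nat) : Int) from rfl,
    pvBLoop_eq text.toList text.toList.length 0 0 0 (by omega) (by omega) (by omega)]

theorem pvSpec_ne_imp (l : List Char) : ∀ (k p : Nat), l.length - p ≤ k →
    pvSpecA l p ≠ pvSpecB l p →
    1 ≤ l.length ∧ pvVO l (l.length - 1) = true ∧
      ∀ o, p ≤ o → o < l.length - 1 → pvVO l o = true →
        ∃ c, c < l.length ∧ o < c ∧ pvVC l c = true := by
  intro k
  induction k with
  | zero =>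
    intro p hk hne
    exfalso
    apply hne
    rw [pvSpecA_eq, pvSpecB_eq, pvFirst_ge (by omega)]
  | succ k ih =>
    intro p hk hne
    rw [pvSpecA_eq l p, pvSpecB_eq l p] at hne
    cases hfo : pvFirst (pvVO l) l.length p with
    | none => rw [hfo] at hne; simp at hne
    | some o =>
      simp only [hfo] at hne
      obtain ⟨ho1, ho2, ho3, ho4⟩ := pvFirst_some hfo
      by_cases hq : l.length ≤ o + 1
      · have hoe : o = l.length - 1 := by omega
        refine ⟨by omega, by rw [← hoe]; exact ho3, fun o' h1 h2 h3 => ?_⟩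
        exfalso
        have := ho4 o' h1 (by omega)
        rw [h3] at this
        simp at this
      · rw [if_neg hq] at hne
        cases hfc : pvFirst (pvVC l) l.length (o + 1) with
        | none => rw [hfc] at hne; simp at hne
        | some c =>
          simp only [hfc] at hne
          obtain ⟨hc1, hc2, hc3, hc4⟩ := pvFirst_some hfc
          have hrec : pvSpecA l (c + 1) ≠ pvSpecB l (c + 1) := fun he => hne (by rw [he])
          obtain ⟨h1, h2, h3⟩ := ih (c + 1) (by omega) hrec
          refine ⟨h1, h2, fun o' ha hb hc => ?_⟩
          rcases Nat.lt_or_ge o' o with hlt | hge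
          · exfalso
            have := ho4 o' ha hlt
            rw [hc] at this
            simp at this
          · rcases Nat.lt_or_ge o' c with hltc | hgec
            · exact ⟨c, hc2, by omega, hc3⟩
            · rcases Nat.eq_or_lt_of_le hgec with heq | hgt
              · exfalso
                have e1 : (l.getD o' ' ' == '[') = true := by
                  have := hc
                  simp only [pvVO, Bool.and_eq_true] at this
                  exact this.1
                have e2 : (l.getD c ' ' == ']') = true := by
                  have := hc3
                  simp only [pvVC, Bool.and_eq_true] at this
                  exact this.1
                rw [heq] at e2
                simp only [beq_iff_eq] at e1 e2
                rw [e1] at e2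
                simp at e2
              · exact h3 o' (by omega) hb hc

theorem pvSpec_append (l : List Char)
    (hvo : pvVO l (l.length - 1) = true)
    (hall : ∀ o, o < l.length - 1 → pvVO l o = true →
      ∃ c, c < l.length ∧ o < c ∧ pvVC l c = true) :
    ∀ (k p : Nat), l.length - p ≤ k → p ≤ l.length - 1 → 1 ≤ l.length →
    pvSpecA l p = pvSpecB l p ++ [l.drop (l.length - 1)] := by
  intro k
  induction k with
  | zero => intro p hk hp hn; omega
  | succ k ih =>
    intro p hk hp hn
    have hlast : pvFirst (pvVO l) l.length p ≠ none := by
      intro hno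
      have := pvFirst_none hno (l.length - 1) hp (by omega)
      rw [hvo] at this
      simp at this
    cases hfo : pvFirst (pvVO l) l.length p with
    | none => exact absurd hfo hlast
    | some o =>
      obtain ⟨ho1, ho2, ho3, ho4⟩ := pvFirst_some hfo
      have hole : o ≤ l.length - 1 := by
        by_contra hgt
        have := ho4 (l.length - 1) hp (by omega)
        rw [hvo] at this
        simp at this
      rcases Nat.eq_or_lt_of_le hole with rfl | hlt
      · rw [pvSpecA_eq l p, pvSpecB_eq l p]
        simp only [hfo]
        rw [if_pos (by omega)]
        rw [pvFirst_ge (by omega)]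
        simp
      · obtain ⟨c', hc'1, hc'2, hc'3⟩ := hall o (by omega) ho3
        have hfcne : pvFirst (pvVC l) l.length (o + 1) ≠ none := by
          intro hno
          have := pvFirst_none hno c' (by omega) hc'1
          rw [hc'3] at this
          simp at this
        cases hfc : pvFirst (pvVC l) l.length (o + 1) with
        | none => exact absurd hfc hfcne
        | some c =>
          obtain ⟨hc1, hc2, hc3, hc4⟩ := pvFirst_some hfc
          have hcn : c ≠ l.length - 1 := by
            intro he
            have e1 : (l.getD c ' ' == ']') = true := by
              have := hc3
              simp only [pvVC, Bool.and_eq_true] at this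
              exact this.1
            have e2 : (l.getD c ' ' == '[') = true := by
              have := hvo
              rw [← he] at this
              simp only [pvVO, Bool.and_eq_true] at this
              exact this.1
            simp only [beq_iff_eq] at e1 e2
            rw [e1] at e2
            simp at e2
          rw [pvSpecA_eq l p, pvSpecB_eq l p]
          simp only [hfo]
          rw [if_neg (by omega)]
          simp only [hfc]
          rw [ih (c + 1) (by omega) (by omega) hn]
          simp


-- ===== VERDICT =====
theorem extract_literals_py_spec : Claim_unchanged_extract_literals_py := by
  intro text _ hD
  rw [pvA_spec, pvB_spec]
  congr 1
  by_contra hne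
  apply hD
  rw [pvD_iff]
  obtain ⟨h1, h2, h3⟩ := pvSpec_ne_imp text.toList text.toList.length 0 (by omega) hne
  exact ⟨h1, h2, fun o ho hvo => h3 o (Nat.zero_le o) ho hvo⟩

theorem extract_literals_py_changed : Claim_changed_extract_literals_py := by
  unfold Claim_changed_extract_literals_py; decide

theorem extract_literals_py_tight : Claim_exact_extract_literals_py := by
  intro text _ hD heq
  obtain ⟨h1, h2, h3⟩ := (pvD_iff text).mp hD
  rw [pvA_spec, pvB_spec,
    pvSpec_append text.toList h2 h3 text.toList.length 0 (by omega) (by omega) h1] at heq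
  have := congrArg List.length heq
  simp at this
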